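-- pv_equiv track=rewrite | github.com/MrBrantCode/unitest_baseline | mut_generate/mist_train_taco/taco_11547/solution.py | count_distinct_good_substrings
-- ===== SOURCE A (Python) =====
-- def count_distinct_good_substrings(s: str, good_bad_map: str, k: int) -> int:
--     S = sorted((s[i:] for i in range(len(s))))
--     p = ''
--     r = 0
--     for e in S:
--         t = 0
--         s = 0
--         for i in range(len(e)):
--             if i >= len(p) or e[i] != p[i]:
--                 s = 1
--             if good_bad_map[ord(e[i]) - ord('a')] == '0':
--                 t += 1
--             if t > k:
--                 break
--             if s:
--                 r += 1
--         p = e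
--     return r
-- ===== SOURCE B (Python) =====
-- def count_distinct_good_substrings(s: str, good_bad_map: str, k: int) -> int:
--     # Collect the distinct good substrings in a hash set instead of
--     # LCP-counting over the sorted suffix array.
--     n = len(s)
--     seen = set()
--     for i in range(n):
--         suf = s[i:]
--         bad = 0
--         for m in range(len(suf)):
--             if good_bad_map[ord(suf[m]) - ord('a')] == '0':
--                 bad += 1
--             if bad > k:
--                 break
--             seen.add(suf[:m + 1])
--     return len(seen)
-- ===== Notes on version B (the rewrite author's own statement) =====
-- stated objective: simpler
-- what changed: B drops A's sort-the-suffixes-and-count-past-the-LCP-of-the-previous-suffix scheme and instead inserts every substring with at most k bad characters into a hash set, returning the set's size; no sorting and no LCP bookkeeping.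
import Mathlib
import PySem

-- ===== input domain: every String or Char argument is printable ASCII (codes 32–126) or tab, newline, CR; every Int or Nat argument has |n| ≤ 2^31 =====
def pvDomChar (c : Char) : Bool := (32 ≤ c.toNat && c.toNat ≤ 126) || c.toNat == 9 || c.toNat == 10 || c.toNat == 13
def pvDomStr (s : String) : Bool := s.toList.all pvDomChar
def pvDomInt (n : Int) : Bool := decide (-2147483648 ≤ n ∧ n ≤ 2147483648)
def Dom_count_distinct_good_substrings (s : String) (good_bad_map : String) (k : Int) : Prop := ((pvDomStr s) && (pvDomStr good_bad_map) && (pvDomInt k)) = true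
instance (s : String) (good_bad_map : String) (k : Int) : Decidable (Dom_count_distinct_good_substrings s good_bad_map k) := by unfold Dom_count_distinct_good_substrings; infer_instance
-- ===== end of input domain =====

-- B replaces A's sorted-suffix/LCP counting by collecting the distinct good substrings in a set; equal on all inputs where A does not raise.


-- ===== PORT A =====
-- shared helper: the Python expression  good_bad_map[ord(c) - ord('a')] == '0'  (both programs contain it verbatim)
def badLookup (gb : List Char) (c : Char) : Bool :=
  PySem.List.pyGetD gb ((c.toNat : Int) - 97) ' ' == '0'

-- A's inner loop over the current suffix e (element-wise, carrying index i, bad count t, new-flag sf, result r)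
def aInner (gb : List Char) (k : Int) (p : List Char) : List Char → Nat → Int → Bool → Int → Int
  | [], _i, _t, _sf, r => r
  | c :: rest, i, t, sf, r =>
    let sf' := sf || decide (p.length ≤ i) || decide (c ≠ p.getD i ' ')
    let t' := if badLookup gb c then t + 1 else t
    if t' > k then r
    else aInner gb k p rest (i + 1) t' sf' (if sf' then r + 1 else r)

def count_distinct_good_substrings (s : String) (good_bad_map : String) (k : Int) : Int :=
  let sl := s.toList
  let S := PySem.List.sorted
    ((PySem.List.pyRange 0 (sl.length : Int) 1).map (fun i => PySem.List.slice sl (some i) none))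
    (fun x => x) false
  (S.foldl (fun (pr : List Char × Int) e => (e, aInner good_bad_map.toList k pr.1 e 0 0 false pr.2))
    (([] : List Char), (0 : Int))).2

-- ===== PORT B =====
-- B's inner loop over the suffix suf (adds suf[:m+1] to the set while the bad count stays ≤ k)
def bInner (gb : List Char) (k : Int) (suf : List Char) :
    List Char → Nat → Int → PySem.Set (List Char) → PySem.Set (List Char)
  | [], _m, _bad, seen => seen
  | c :: rest, m, bad, seen =>
    let bad' := if badLookup gb c then bad + 1 else bad
    if bad' > k then seen
    else bInner gb k suf rest (m + 1) bad' (PySem.Set.add seen (suf.take (m + 1)))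

def count_distinct_good_substrings_alt (s : String) (good_bad_map : String) (k : Int) : Int :=
  let sl := s.toList
  let seen := (PySem.List.pyRange 0 (sl.length : Int) 1).foldl
    (fun seen i =>
      let suf := PySem.List.slice sl (some i) none
      bInner good_bad_map.toList k suf suf 0 0 seen)
    PySem.Set.empty
  PySem.Set.len seen

-- ===== PRECONDITION & SPEC =====
-- Pre_ excludes exactly the inputs where both Pythons raise IndexError: some character c of s
-- with ord(c) - ord('a') outside the (negative-index-wrapping) range of good_bad_map.
def Pre_count_distinct_good_substrings (s : String) (good_bad_map : String) (k : Int) : Prop :=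
  (s.toList.all (fun c =>
    decide (PySem.Raise.InRange good_bad_map.toList.length ((c.toNat : Int) - 97)))) = true
instance (s : String) (good_bad_map : String) (k : Int) : Decidable (Pre_count_distinct_good_substrings s good_bad_map k) := by unfold Pre_count_distinct_good_substrings; infer_instance

def pvWitness_count_distinct_good_substrings : String × String × Int := ("cabab", "110", 1)

def Spec_count_distinct_good_substrings (s : String) (good_bad_map : String) (k : Int) (out : Int) : Prop := out = count_distinct_good_substrings_alt s good_bad_map k
instance (s : String) (good_bad_map : String) (k : Int) (out : Int) : Decidable (Spec_count_distinct_good_substrings s good_bad_map k out) := by unfold Spec_count_distinct_good_substrings; infer_instance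

-- ===== CLAIM (what is proved, stated in full; the proofs are below) =====
def Claim_equal_count_distinct_good_substrings : Prop := ∀ (s : String) (good_bad_map : String) (k : Int), Dom_count_distinct_good_substrings s good_bad_map k → Pre_count_distinct_good_substrings s good_bad_map k → Spec_count_distinct_good_substrings s good_bad_map k (count_distinct_good_substrings s good_bad_map k)

-- ===== LEMMAS AND PROOFS =====

-- bad-character count of a word, as an Int
def cntI (gb : List Char) (w : List Char) : Int := (w.countP (badLookup gb) : Int)

def isGood (gb : List Char) (k : Int) (w : List Char) : Bool := decide (cntI gb w ≤ k)

-- the good nonempty prefixes of e, as a list (in increasing length order)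
def goodPrefs (gb : List Char) (k : Int) (e : List Char) : List (List Char) :=
  ((List.range e.length).filter (fun m => isGood gb k (e.take (m + 1)))).map (fun m => e.take (m + 1))

-- the set of good nonempty prefixes of members of es
def allGood (gb : List Char) (k : Int) (es : List (List Char)) : Finset (List Char) :=
  (es.flatMap (goodPrefs gb k)).toFinset

-- longest common prefix length
def lcp : List Char → List Char → Nat
  | a :: as, b :: bs => if a = b then lcp as bs + 1 else 0
  | _, _ => 0

lemma le_lcp_iff : ∀ (a b : List Char) (n : Nat),
    n ≤ lcp a b ↔ n ≤ a.length ∧ n ≤ b.length ∧ a.take n = b.take n := by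
  intro a
  induction a with
  | nil =>
    intro b n
    cases n <;> simp [lcp]
  | cons x as ih =>
    intro b n
    cases b with
    | nil => cases n <;> simp [lcp]
    | cons y bs =>
      cases n with
      | zero => simp
      | succ m =>
        by_cases hxy : x = y
        · subst hxy
          simp [lcp, ih bs m]
        · simp [lcp, hxy]

lemma lcp_le_left (a b : List Char) : lcp a b ≤ a.length :=
  ((le_lcp_iff a b (lcp a b)).mp le_rfl).1

lemma lcp_lt_succ_iff (p E : List Char) (i : Nat) (hi : i < E.length) :
    lcp p E < i + 1 ↔ (lcp p E < i ∨ p.length ≤ i ∨ E[i] ≠ p.getD i ' ') := by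
  constructor
  · intro h
    by_cases h1 : lcp p E < i
    · exact Or.inl h1
    · have hlcp : lcp p E = i := by omega
      by_cases h2 : p.length ≤ i
      · exact Or.inr (Or.inl h2)
      · refine Or.inr (Or.inr ?_)
        intro heq
        have hip : i < p.length := by omega
        have htk : p.take i = E.take i := ((le_lcp_iff p E i).mp (by omega)).2.2
        have : i + 1 ≤ lcp p E := by
          rw [le_lcp_iff]
          refine ⟨by omega, by omega, ?_⟩
          rw [List.take_add_one, List.take_add_one, htk]
          rw [List.getD_eq_getElem?_getD, List.getElem?_eq_getElem hip] at heq
          simp only [Option.getD_some] at heq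
          simp [List.getElem?_eq_getElem hip, List.getElem?_eq_getElem hi, heq]
        omega
  · intro h
    rcases h with h | h | h
    · omega
    · have := lcp_le_left p E; omega
    · by_contra hcon
      have hle : i + 1 ≤ lcp p E := by omega
      obtain ⟨hp, hE', htk⟩ := (le_lcp_iff p E (i+1)).mp hle
      apply h
      have hip : i < p.length := by omega
      have : p[i] = E[i] := by
        have h1 : (p.take (i+1))[i]'(by simp; omega) = p[i] := List.getElem_take
        have h2 : (E.take (i+1))[i]'(by simp; omega) = E[i] := List.getElem_take
        simp only [← h1, ← h2, htk]
      rw [List.getD_eq_getElem?_getD, List.getElem?_eq_getElem hip]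
      simp only [Option.getD_some]
      exact this.symm

lemma cnt_take_mono (gb : List Char) (E : List Char) {m n : Nat} (h : m ≤ n) :
    cntI gb (E.take m) ≤ cntI gb (E.take n) := by
  unfold cntI
  have hsub : (E.take m).Sublist (E.take n) := by
    have : E.take m = (E.take n).take m := by rw [List.take_take, Nat.min_eq_left h]
    rw [this]
    exact List.take_sublist _ _
  exact_mod_cast hsub.countP_le

lemma cnt_take_succ (gb : List Char) (E : List Char) (i : Nat) (hi : i < E.length) :
    cntI gb (E.take (i + 1)) = cntI gb (E.take i) + (if badLookup gb E[i] then 1 else 0) := by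
  unfold cntI
  rw [List.take_add_one, List.getElem?_eq_getElem hi]
  simp only [Option.toList_some, List.countP_append, List.countP_cons, List.countP_nil]
  push_cast
  split_ifs <;> simp

-- characterisation of A's inner loop
lemma aInner_spec (gb : List Char) (k : Int) (p E : List Char) :
    ∀ (rest : List Char) (i : Nat) (r : Int), E.drop i = rest →
    aInner gb k p rest i (cntI gb (E.take i)) (decide (lcp p E < i)) r
      = r + (((List.range (E.length - i)).countP
          (fun m => isGood gb k (E.take (i + m + 1)) && decide (lcp p E < i + m + 1)) : Nat) : Int) := by
  intro rest
  induction rest with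
  | nil =>
    intro i r hdrop
    have hlen : E.length ≤ i := by
      by_contra hcon
      have := List.drop_eq_nil_iff.mp hdrop
      omega
    have : E.length - i = 0 := by omega
    simp [aInner, this]
  | cons c rest ih =>
    intro i r hdrop
    have hi : i < E.length := by
      by_contra hcon
      rw [List.drop_eq_nil_of_le (by omega)] at hdrop
      simp at hdrop
    have hcons : E.drop i = E[i] :: E.drop (i + 1) := List.drop_eq_getElem_cons hi
    rw [hdrop] at hcons
    have hc : c = E[i] := (List.cons.inj hcons).1
    have hrest : rest = E.drop (i + 1) := (List.cons.inj hcons).2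
    have hsf : (decide (lcp p E < i) || decide (p.length ≤ i) || decide (c ≠ p.getD i ' '))
        = decide (lcp p E < i + 1) := by
      subst hc
      simp only [decide_eq_decide.mpr (lcp_lt_succ_iff p E i hi)]
      simp [Bool.or_assoc]
    have ht' : (if badLookup gb c then cntI gb (E.take i) + 1 else cntI gb (E.take i))
        = cntI gb (E.take (i + 1)) := by
      subst hc
      rw [cnt_take_succ gb E i hi]
      split_ifs <;> simp
    show (let sf' := decide (lcp p E < i) || decide (p.length ≤ i) || decide (c ≠ p.getD i ' ');
          let t' := if badLookup gb c then cntI gb (E.take i) + 1 else cntI gb (E.take i);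
          if t' > k then r
          else aInner gb k p rest (i + 1) t' sf' (if sf' then r + 1 else r)) = _
    simp only [hsf, ht']
    by_cases hbr : cntI gb (E.take (i + 1)) > k
    · simp only [hbr, if_pos]
      have hzero : (List.range (E.length - i)).countP
          (fun m => isGood gb k (E.take (i + m + 1)) && decide (lcp p E < i + m + 1)) = 0 := by
        rw [List.countP_eq_zero]
        intro m _
        have hmono : cntI gb (E.take (i + 1)) ≤ cntI gb (E.take (i + m + 1)) :=
          cnt_take_mono gb E (by omega)
        have : isGood gb k (E.take (i + m + 1)) = false := by
          unfold isGood
          simp only [decide_eq_false_iff_not]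
          omega
        simp [this]
      rw [hzero]
      simp
    · simp only [if_neg hbr]
      rw [ih (i + 1) (if decide (lcp p E < i + 1) then r + 1 else r) hrest.symm]
      have hgood : isGood gb k (E.take (i + 1)) = true := by
        unfold isGood
        simp only [decide_eq_true_eq]
        omega
      have hlen : E.length - i = (E.length - (i + 1)) + 1 := by omega
      rw [hlen, List.range_succ_eq_map, List.countP_cons, List.countP_map]
      have hP0 : (isGood gb k (E.take (i + 0 + 1)) && decide (lcp p E < i + 0 + 1))
          = decide (lcp p E < i + 1) := by
        simp only [Nat.add_zero, hgood, Bool.true_and]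
      have hshift : ((List.range (E.length - (i + 1))).countP
            ((fun m => isGood gb k (E.take (i + m + 1)) && decide (lcp p E < i + m + 1)) ∘ Nat.succ))
          = (List.range (E.length - (i + 1))).countP
            (fun m => isGood gb k (E.take (i + 1 + m + 1)) && decide (lcp p E < i + 1 + m + 1)) := by
        apply List.countP_congr
        intro m _
        have harith : i + (m + 1) + 1 = i + 1 + m + 1 := by omega
        simp [Function.comp, Nat.succ_eq_add_one, harith]
      rw [hshift] at *
      rw [hP0]
      push_cast
      by_cases hl : lcp p E < i + 1 <;> simp [hl] <;> ring

-- membership in goodPrefs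
lemma mem_goodPrefs (gb : List Char) (k : Int) (a w : List Char) :
    w ∈ goodPrefs gb k a ↔ (w ≠ [] ∧ w <+: a ∧ isGood gb k w = true) := by
  unfold goodPrefs
  simp only [List.mem_map, List.mem_filter, List.mem_range]
  constructor
  · rintro ⟨m, ⟨hm, hgood⟩, rfl⟩
    refine ⟨?_, List.take_prefix _ _, hgood⟩
    have : (a.take (m + 1)).length = m + 1 := by
      rw [List.length_take]
      omega
    intro hnil
    rw [hnil] at this
    simp at this
  · rintro ⟨hne, hpre, hgood⟩
    refine ⟨w.length - 1, ⟨?_, ?_⟩, ?_⟩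
    · have h1 : 0 < w.length := List.length_pos_iff.mpr hne
      have h2 : w.length ≤ a.length := hpre.length_le
      omega
    · have h1 : 0 < w.length := List.length_pos_iff.mpr hne
      have : w.length - 1 + 1 = w.length := by omega
      rw [this, ← List.prefix_iff_eq_take.mp hpre]
      exact hgood
    · have h1 : 0 < w.length := List.length_pos_iff.mpr hne
      have : w.length - 1 + 1 = w.length := by omega
      rw [this, ← List.prefix_iff_eq_take.mp hpre]

lemma mem_allGood (gb : List Char) (k : Int) (es : List (List Char)) (w : List Char) :
    w ∈ allGood gb k es ↔ ∃ a ∈ es, w ≠ [] ∧ w <+: a ∧ isGood gb k w = true := by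
  unfold allGood
  simp only [List.mem_toFinset, List.mem_flatMap]
  constructor
  · rintro ⟨a, ha, hw⟩
    exact ⟨a, ha, (mem_goodPrefs gb k a w).mp hw⟩
  · rintro ⟨a, ha, hw⟩
    exact ⟨a, ha, (mem_goodPrefs gb k a w).mpr hw⟩

-- lexicographic sandwich: a common prefix of a and e is a prefix of anything between them
lemma prefix_sandwich : ∀ (w a p e : List Char),
    w <+: a → w <+: e → a ≤ p → p ≤ e → w <+: p := by
  intro w
  induction w with
  | nil => intro a p e _ _ _ _; exact List.nil_prefix
  | cons c w ihw =>
    intro a p e hwa hwe hap hpe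
    obtain ⟨a', rfl, hwa'⟩ : ∃ a', a = c :: a' ∧ w <+: a' := by
      cases a with
      | nil => exact absurd hwa (by simp)
      | cons x a' =>
        rw [List.cons_prefix_cons] at hwa
        exact ⟨a', by rw [hwa.1], hwa.2⟩
    obtain ⟨e', rfl, hwe'⟩ : ∃ e', e = c :: e' ∧ w <+: e' := by
      cases e with
      | nil => exact absurd hwe (by simp)
      | cons x e' =>
        rw [List.cons_prefix_cons] at hwe
        exact ⟨e', by rw [hwe.1], hwe.2⟩
    cases p with
    | nil =>
      exfalso
      have : (c :: a') > ([] : List Char) → False := fun h => absurd hap (not_le.mpr h)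
      apply this
      show ([] : List Char) < c :: a'
      exact List.Lex.nil
    | cons d p' =>
      have hdc : d = c := by
        rcases lt_trichotomy d c with h | h | h
        · exfalso
          apply absurd hap (not_le.mpr ?_)
          show (d :: p') < c :: a'
          exact List.Lex.rel h
        · exact h
        · exfalso
          apply absurd hpe (not_le.mpr ?_)
          show (c :: e') < d :: p'
          exact List.Lex.rel h
      subst hdc
      have hap' : a' ≤ p' := by
        by_contra hcon
        apply absurd hap (not_le.mpr ?_)
        show (d :: p') < d :: a'
        exact List.Lex.cons (not_le.mp hcon)
      have hpe' : p' ≤ e' := by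
        by_contra hcon
        apply absurd hpe (not_le.mpr ?_)
        show (d :: e') < d :: p'
        exact List.Lex.cons (not_le.mp hcon)
      rw [List.cons_prefix_cons]
      exact ⟨rfl, ihw a' p' e' hwa' hwe' hap' hpe'⟩

lemma prefix_iff_le_lcp (p e w : List Char) (hwe : w <+: e) :
    w <+: p ↔ w.length ≤ lcp p e := by
  constructor
  · intro hwp
    rw [le_lcp_iff]
    refine ⟨hwp.length_le, hwe.length_le, ?_⟩
    rw [← List.prefix_iff_eq_take.mp hwp, ← List.prefix_iff_eq_take.mp hwe]
  · intro hle
    obtain ⟨hp, he, htk⟩ := (le_lcp_iff p e w.length).mp hle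
    have hwe' : w = e.take w.length := List.prefix_iff_eq_take.mp hwe
    rw [List.prefix_iff_eq_take, htk]
    exact hwe'

-- the counting step: processing e after p adds exactly the prefixes past the lcp
lemma card_step (gb : List Char) (k : Int) (done : List (List Char)) (p e : List Char)
    (hdp : ∀ a ∈ done, a ≤ p) (hmem : p ∈ done ∨ (p = [] ∧ done = [])) (hpe : p ≤ e) :
    ((allGood gb k (done ++ [e])).card : Int)
      = (allGood gb k done).card
        + (((List.range e.length).countP
            (fun m => isGood gb k (e.take (m + 1)) && decide (lcp p e < m + 1)) : Nat) : Int) := by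
  classical
  have hU : allGood gb k (done ++ [e]) = allGood gb k done ∪ (goodPrefs gb k e).toFinset := by
    unfold allGood
    rw [List.flatMap_append, List.toFinset_append]
    simp
  set newList : List (List Char) :=
    ((List.range e.length).filter (fun m => isGood gb k (e.take (m + 1)) && decide (lcp p e < m + 1))).map
      (fun m => e.take (m + 1)) with hnewList
  have hnz : ∀ m ∈ (List.range e.length).filter
      (fun m => isGood gb k (e.take (m + 1)) && decide (lcp p e < m + 1)), m < e.length := by
    intro m hm
    exact List.mem_range.mp (List.mem_of_mem_filter hm)
  have hnodup : newList.Nodup := by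
    rw [hnewList]
    apply List.Nodup.map_on
    · intro m hm m' hm' heq
      have h1 := hnz m hm
      have h2 := hnz m' hm'
      have l1 : (e.take (m + 1)).length = m + 1 := by rw [List.length_take]; omega
      have l2 : (e.take (m' + 1)).length = m' + 1 := by rw [List.length_take]; omega
      rw [heq] at l1
      rw [l2] at l1
      omega
    · exact List.nodup_range.filter _
  have hsdiff : newList.toFinset = (goodPrefs gb k e).toFinset \ allGood gb k done := by
    ext w
    rw [Finset.mem_sdiff, List.mem_toFinset, List.mem_toFinset, hnewList]
    simp only [List.mem_map, List.mem_filter, List.mem_range, Bool.and_eq_true, decide_eq_true_eq]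
    constructor
    · rintro ⟨m, ⟨hm, hgood, hlcp⟩, rfl⟩
      have hwlen : (e.take (m + 1)).length = m + 1 := by rw [List.length_take]; omega
      refine ⟨(mem_goodPrefs gb k e _).mpr ⟨?_, List.take_prefix _ _, hgood⟩, ?_⟩
      · intro hnil; rw [hnil] at hwlen; simp at hwlen
      · intro hmem
        obtain ⟨a, ha, hne, hpa, hg⟩ := (mem_allGood gb k done _).mp hmem
        have hwp : e.take (m + 1) <+: p :=
          prefix_sandwich _ a p e hpa (List.take_prefix _ _) (hdp a ha) hpe
        have := (prefix_iff_le_lcp p e _ (List.take_prefix _ _)).mp hwp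
        rw [hwlen] at this
        omega
    · rintro ⟨hgp, hnot⟩
      obtain ⟨hne, hpre, hgood⟩ := (mem_goodPrefs gb k e w).mp hgp
      have h1 : 0 < w.length := List.length_pos_iff.mpr hne
      have h2 : w.length ≤ e.length := hpre.length_le
      refine ⟨w.length - 1, ⟨by omega, ?_, ?_⟩, ?_⟩
      · have : w.length - 1 + 1 = w.length := by omega
        rw [this, ← List.prefix_iff_eq_take.mp hpre]
        exact hgood
      · by_contra hcon
        have hle : w.length ≤ lcp p e := by omega
        have hwp : w <+: p := (prefix_iff_le_lcp p e w hpre).mpr hle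
        apply hnot
        rw [mem_allGood]
        rcases hmem with hpd | ⟨hpn, hdn⟩
        · exact ⟨p, hpd, hne, hwp, hgood⟩
        · exfalso
          rw [hpn] at hwp
          exact hne (List.prefix_nil.mp hwp)
      · have : w.length - 1 + 1 = w.length := by omega
        rw [this, ← List.prefix_iff_eq_take.mp hpre]
  have hdisj : Disjoint (allGood gb k done) ((goodPrefs gb k e).toFinset \ allGood gb k done) :=
    Finset.disjoint_sdiff
  have hcard : (allGood gb k (done ++ [e])).card
      = (allGood gb k done).card + ((goodPrefs gb k e).toFinset \ allGood gb k done).card := by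
    rw [hU, ← Finset.union_sdiff_self_eq_union, Finset.card_union_of_disjoint hdisj]
  rw [hcard, ← hsdiff, List.toFinset_card_of_nodup hnodup, hnewList, List.length_map,
    ← List.countP_eq_length_filter]
  push_cast
  ring

-- A's outer fold
lemma foldA_spec (gb : List Char) (k : Int) :
    ∀ (S done : List (List Char)) (p : List Char) (r : Int),
    (∀ a ∈ done, a ≤ p) → (p ∈ done ∨ (p = [] ∧ done = [])) → (∀ b ∈ S, p ≤ b) →
    S.Pairwise (· ≤ ·) → r = ((allGood gb k done).card : Int) →
    (S.foldl (fun (pr : List Char × Int) e => (e, aInner gb k pr.1 e 0 0 false pr.2)) (p, r)).2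
      = ((allGood gb k (done ++ S)).card : Int) := by
  intro S
  induction S with
  | nil =>
    intro done p r _ _ _ _ hr
    simpa using hr
  | cons e S' ih =>
    intro done p r hdp hmem hpb hpair hr
    obtain ⟨hhead, htail⟩ := List.pairwise_cons.mp hpair
    have hpe : p ≤ e := hpb e (List.mem_cons_self)
    have hstep : aInner gb k p e 0 0 false r = ((allGood gb k (done ++ [e])).card : Int) := by
      have h0 : aInner gb k p e 0 (cntI gb (e.take 0)) (decide (lcp p e < 0)) r
          = r + (((List.range (e.length - 0)).countP
              (fun m => isGood gb k (e.take (0 + m + 1)) && decide (lcp p e < 0 + m + 1)) : Nat) : Int) :=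
        aInner_spec gb k p e e 0 r rfl
      simp only [List.take_zero, Nat.sub_zero, Nat.zero_add] at h0
      have hc0 : cntI gb ([] : List Char) = 0 := by simp [cntI]
      rw [hc0] at h0
      have hd0 : decide (lcp p e < 0) = false := by simp
      rw [hd0] at h0
      rw [h0, hr, card_step gb k done p e hdp hmem hpe]
    show (S'.foldl (fun (pr : List Char × Int) e => (e, aInner gb k pr.1 e 0 0 false pr.2))
        (e, aInner gb k p e 0 0 false r)).2 = _
    rw [hstep]
    have := ih (done ++ [e]) e ((allGood gb k (done ++ [e])).card : Int)
      (by
        intro a ha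
        rcases List.mem_append.mp ha with h | h
        · exact le_trans (hdp a h) hpe
        · simp at h; rw [h])
      (Or.inl (by simp))
      hhead htail rfl
    rw [this]
    congr 1
    rw [List.append_assoc]
    rfl

-- allGood only depends on the members
lemma allGood_congr (gb : List Char) (k : Int) (es es' : List (List Char))
    (h : ∀ a, a ∈ es ↔ a ∈ es') : allGood gb k es = allGood gb k es' := by
  ext w
  rw [mem_allGood, mem_allGood]
  constructor
  · rintro ⟨a, ha, hw⟩; exact ⟨a, (h a).mp ha, hw⟩
  · rintro ⟨a, ha, hw⟩; exact ⟨a, (h a).mpr ha, hw⟩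

def suffixes (sl : List Char) : List (List Char) := (List.range sl.length).map (fun i => sl.drop i)

lemma portA_eq (s good_bad_map : String) (k : Int) :
    count_distinct_good_substrings s good_bad_map k
      = ((allGood good_bad_map.toList k (suffixes s.toList)).card : Int) := by
  unfold count_distinct_good_substrings
  have hmap : (PySem.List.pyRange 0 (s.toList.length : Int) 1).map
      (fun i => PySem.List.slice s.toList (some i) none) = suffixes s.toList := by
    rw [PySem.List.pyRange_zero_nat, List.map_map]
    unfold suffixes
    apply List.map_congr_left
    intro i _
    simp [PySem.List.slice_from_natCast]
  show ((PySem.List.sorted ((PySem.List.pyRange 0 (s.toList.length : Int) 1).map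
      (fun i => PySem.List.slice s.toList (some i) none)) (fun x => x) false).foldl
      (fun (pr : List Char × Int) e => (e, aInner good_bad_map.toList k pr.1 e 0 0 false pr.2))
      (([] : List Char), (0 : Int))).2 = _
  have hEq : PySem.List.sorted (suffixes s.toList) (fun x => x) false
      = @PySem.List.sorted (List Char) (List Char) Preorder.toLT LinearOrder.toDecidableLT
          (suffixes s.toList) (fun x => x) false := by
    congr 1
  rw [hmap, hEq]
  have hpair : (@PySem.List.sorted (List Char) (List Char) Preorder.toLT LinearOrder.toDecidableLT
      (suffixes s.toList) (fun x => x) false).Pairwise (· ≤ ·) := by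
    simpa using PySem.List.sorted_pairwise (xs := suffixes s.toList) (key := fun (x : List Char) => x)
  have hnil_le : ∀ b : List Char, ([] : List Char) ≤ b := fun b =>
    le_of_not_gt (fun h => by cases h)
  have h0 : (0 : Int) = ((allGood good_bad_map.toList k ([] : List (List Char))).card : Int) := by
    simp [allGood]
  rw [foldA_spec good_bad_map.toList k
    (@PySem.List.sorted (List Char) (List Char) Preorder.toLT LinearOrder.toDecidableLT
      (suffixes s.toList) (fun x => x) false)
    [] [] 0 (by simp) (Or.inr ⟨rfl, rfl⟩) (fun b _ => hnil_le b) hpair h0]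
  rw [List.nil_append]
  have hg : allGood good_bad_map.toList k
      (@PySem.List.sorted (List Char) (List Char) Preorder.toLT LinearOrder.toDecidableLT
        (suffixes s.toList) (fun x => x) false)
      = allGood good_bad_map.toList k (suffixes s.toList) :=
    allGood_congr _ _ _ _ (fun a => by rw [← hEq]; exact PySem.List.mem_sorted _ _ _ _)
  rw [hg]

-- B's inner loop builds exactly the update by goodPrefs
lemma bInner_spec (gb : List Char) (k : Int) (suf : List Char) :
    ∀ (rest : List Char) (m : Nat) (seen : PySem.Set (List Char)), suf.drop m = rest →
    bInner gb k suf rest m (cntI gb (suf.take m)) seen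
      = PySem.Set.update seen
          (((List.range (suf.length - m)).filter (fun j => isGood gb k (suf.take (m + j + 1)))).map
            (fun j => suf.take (m + j + 1))) := by
  intro rest
  induction rest with
  | nil =>
    intro m seen hdrop
    have hlen : suf.length ≤ m := by
      by_contra hcon
      have := List.drop_eq_nil_iff.mp hdrop
      omega
    have : suf.length - m = 0 := by omega
    simp [bInner, this, PySem.Set.update_nil]
  | cons c rest ih =>
    intro m seen hdrop
    have hm : m < suf.length := by
      by_contra hcon
      rw [List.drop_eq_nil_of_le (by omega)] at hdrop
      simp at hdrop
    have hcons : suf.drop m = suf[m] :: suf.drop (m + 1) := List.drop_eq_getElem_cons hm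
    rw [hdrop] at hcons
    have hc : c = suf[m] := (List.cons.inj hcons).1
    have hrest : rest = suf.drop (m + 1) := (List.cons.inj hcons).2
    have hbad : (if badLookup gb c then cntI gb (suf.take m) + 1 else cntI gb (suf.take m))
        = cntI gb (suf.take (m + 1)) := by
      subst hc
      rw [cnt_take_succ gb suf m hm]
      split_ifs <;> simp
    show (let bad' := if badLookup gb c then cntI gb (suf.take m) + 1 else cntI gb (suf.take m);
          if bad' > k then seen
          else bInner gb k suf rest (m + 1) bad' (PySem.Set.add seen (suf.take (m + 1)))) = _
    simp only [hbad]
    by_cases hbr : cntI gb (suf.take (m + 1)) > k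
    · simp only [hbr, if_pos]
      have hf : (List.range (suf.length - m)).filter (fun j => isGood gb k (suf.take (m + j + 1))) = [] := by
        rw [List.filter_eq_nil_iff]
        intro j _
        have hmono : cntI gb (suf.take (m + 1)) ≤ cntI gb (suf.take (m + j + 1)) :=
          cnt_take_mono gb suf (by omega)
        unfold isGood
        simp only [decide_eq_false_iff_not, Bool.not_eq_true]
        omega
      rw [hf]
      simp [PySem.Set.update_nil]
    · simp only [if_neg hbr]
      rw [ih (m + 1) (PySem.Set.add seen (suf.take (m + 1))) hrest.symm]
      have hgood : isGood gb k (suf.take (m + 1)) = true := by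
        unfold isGood
        simp only [decide_eq_true_eq]
        omega
      have hlen : suf.length - m = (suf.length - (m + 1)) + 1 := by omega
      rw [hlen, List.range_succ_eq_map, List.filter_cons]
      have hP0 : isGood gb k (suf.take (m + 0 + 1)) = true := by
        simpa using hgood
      rw [if_pos hP0]
      rw [List.map_cons]
      have hx0 : suf.take (m + 0 + 1) = suf.take (m + 1) := by norm_num
      rw [hx0, PySem.Set.update_cons]
      congr 1
      rw [List.filter_map, List.map_map]
      have hfil : ((fun j => isGood gb k (suf.take (m + j + 1))) ∘ Nat.succ)
          = (fun j => isGood gb k (suf.take (m + 1 + j + 1))) := by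
        funext j
        simp only [Function.comp, Nat.succ_eq_add_one]
        congr 3
        omega
      rw [hfil]
      apply List.map_congr_left
      intro j _
      have harith : m + (j + 1) + 1 = m + 1 + j + 1 := by omega
      simp [Nat.succ_eq_add_one, harith]

lemma foldl_update {α : Type} (g : α → List (List Char)) :
    ∀ (xs : List α) (seen : PySem.Set (List Char)),
    xs.foldl (fun sn x => PySem.Set.update sn (g x)) seen = PySem.Set.update seen (xs.flatMap g) := by
  intro xs
  induction xs with
  | nil => intro seen; simp [PySem.Set.update_nil]
  | cons x xs ih =>
    intro seen
    rw [List.foldl_cons, ih, List.flatMap_cons, PySem.Set.update_append]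

lemma ofList_length_eq_card (L : List (List Char)) :
    ((PySem.Set.ofList L).length : Int) = (L.toFinset.card : Int) := by
  have hnodup : (PySem.Set.ofList L).Nodup := PySem.Set.nodup_ofList L
  have hfin : (PySem.Set.ofList L).toFinset = L.toFinset := by
    ext w
    simp [PySem.Set.mem_ofList]
  rw [← hfin, List.toFinset_card_of_nodup hnodup]

lemma portB_eq (s good_bad_map : String) (k : Int) :
    count_distinct_good_substrings_alt s good_bad_map k
      = ((allGood good_bad_map.toList k (suffixes s.toList)).card : Int) := by
  unfold count_distinct_good_substrings_alt
  have hstep : ∀ (seen : PySem.Set (List Char)) (e : List Char),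
      bInner good_bad_map.toList k e e 0 0 seen
        = PySem.Set.update seen (goodPrefs good_bad_map.toList k e) := by
    intro seen e
    have h0 : cntI good_bad_map.toList (e.take 0) = 0 := by simp [cntI]
    have hb := bInner_spec good_bad_map.toList k e e 0 seen rfl
    rw [h0] at hb
    rw [hb]
    unfold goodPrefs
    norm_num
  have hmap : (PySem.List.pyRange 0 (s.toList.length : Int) 1).foldl
      (fun seen i =>
        bInner good_bad_map.toList k (PySem.List.slice s.toList (some i) none)
          (PySem.List.slice s.toList (some i) none) 0 0 seen)
      PySem.Set.empty
      = (suffixes s.toList).foldl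
          (fun seen e => PySem.Set.update seen (goodPrefs good_bad_map.toList k e)) PySem.Set.empty := by
    rw [PySem.List.pyRange_zero_nat, List.foldl_map]
    unfold suffixes
    rw [List.foldl_map]
    apply PySem.List.foldl_congr_mem
    intro seen i _
    rw [PySem.List.slice_from_natCast, hstep]
  show (PySem.Set.len ((PySem.List.pyRange 0 (s.toList.length : Int) 1).foldl _ PySem.Set.empty)) = _
  rw [hmap, foldl_update (goodPrefs good_bad_map.toList k) (suffixes s.toList) PySem.Set.empty]
  have hemp : PySem.Set.update PySem.Set.empty ((suffixes s.toList).flatMap (goodPrefs good_bad_map.toList k))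
      = PySem.Set.ofList ((suffixes s.toList).flatMap (goodPrefs good_bad_map.toList k)) :=
    PySem.Set.update_empty _
  rw [hemp]
  show ((PySem.Set.ofList _).length : Int) = _
  rw [ofList_length_eq_card]
  rfl

-- ===== VERDICT (by name: the statement is the Claim_ definition above) =====
theorem count_distinct_good_substrings_spec : Claim_equal_count_distinct_good_substrings := by
  intro s good_bad_map k _hdom _hpre
  unfold Spec_count_distinct_good_substrings
  rw [portA_eq, portB_eq]
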